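-- pv_equiv track=rewrite | github.com/drewancameron/DiachronicSenseChange | scripts/align_translations.py | extract_ref_section
-- ===== SOURCE A (Python) =====
-- def extract_ref_section(ref: str) -> str | None:
--     """
--     Extract section reference (book.line or book.section).
--     "urn:cts:greekLit:tlg0012.tlg001.perseus-grc2.1.16" -> "1.16"
--     """
--     if "perseus-grc" in ref or "perseus-eng" in ref:
--         parts = ref.split(".")
--         for i, p in enumerate(parts):
--             if "perseus-" in p:
--                 remaining = parts[i + 1:]
--                 if remaining:
--                     return ".".join(remaining)
--     parts = ref.split(".")
--     return ref
-- ===== SOURCE B (Python) =====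
-- def extract_ref_section(ref: str) -> str | None:
--     if "perseus-grc" in ref or "perseus-eng" in ref:
--         dot = ref.find(".", ref.find("perseus-"))
--         if dot != -1:
--             return ref[dot + 1:]
--     return ref
-- ===== Notes on version B (the rewrite author's own statement) =====
-- stated objective: idiomatic
-- what changed: B drops A's split-into-parts list and enumerate loop entirely and scans the raw string with two find calls (first occurrence of the perseus marker, then the next dot after it), returning the tail slice after that dot and falling through to ref when there is none.
import Mathlib
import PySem

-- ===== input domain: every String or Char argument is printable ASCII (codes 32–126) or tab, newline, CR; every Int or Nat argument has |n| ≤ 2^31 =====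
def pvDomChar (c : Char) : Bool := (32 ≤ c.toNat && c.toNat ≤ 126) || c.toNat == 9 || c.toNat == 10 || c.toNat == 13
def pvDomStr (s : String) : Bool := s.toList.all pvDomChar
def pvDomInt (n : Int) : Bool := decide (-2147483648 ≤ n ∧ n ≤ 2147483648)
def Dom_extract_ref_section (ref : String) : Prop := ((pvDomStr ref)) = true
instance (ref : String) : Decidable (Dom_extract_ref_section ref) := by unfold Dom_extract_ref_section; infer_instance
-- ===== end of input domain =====

-- B replaces A's split-into-parts loop by a direct two-find scan of the raw string (idiomatic; same cost).

-- ===== PORT A =====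
-- A's 'for i, p in enumerate(parts): …' loop: first part containing "perseus-";
-- 'remaining = parts[i+1:]' is exactly the rest of the parts list at that point.
def pvLoopA : List (List Char) → Option (List Char)
  | [] => none
  | p :: rest =>
    if PySem.Chars.isIn "perseus-".toList p then
      (if rest = [] then pvLoopA rest else some (PySem.Chars.join ['.'] rest))
    else pvLoopA rest

def extract_ref_section (ref : String) : Option String :=
  if PySem.Str.isIn "perseus-grc" ref || PySem.Str.isIn "perseus-eng" ref then
    match pvLoopA (PySem.Chars.splitOn ref.toList ['.']) with
    | some r => some (String.ofList r)
    | none => some ref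
  else some ref

-- ===== PORT B =====
def extract_ref_section_alt (ref : String) : Option String :=
  if PySem.Str.isIn "perseus-grc" ref || PySem.Str.isIn "perseus-eng" ref then
    let dot := PySem.Str.findFrom ref "." (PySem.Str.find ref "perseus-")
    if dot ≠ -1 then some (PySem.Str.slice ref (some (dot + 1)) none)
    else some ref
  else some ref

-- ===== PRECONDITION & SPEC =====
def Spec_extract_ref_section (ref : String) (out : Option String) : Prop := out = extract_ref_section_alt ref
instance (ref : String) (out : Option String) : Decidable (Spec_extract_ref_section ref out) := by unfold Spec_extract_ref_section; infer_instance

-- ===== CLAIM (what is proved, stated in full; the proofs are below) =====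
def Claim_equal_extract_ref_section : Prop := ∀ (ref : String), Dom_extract_ref_section ref → Spec_extract_ref_section ref (extract_ref_section ref)

-- ===== LEMMAS AND PROOFS =====

-- Splitting on '.' as the natural structural recursion (proof-side model of ref.split(".")).
def pvSplitDot : List Char → List (List Char)
  | [] => [[]]
  | c :: r =>
    if c = '.' then [] :: pvSplitDot r
    else
      match pvSplitDot r with
      | [] => [[c]]
      | h :: t => (c :: h) :: t

theorem pvSplitDot_ne_nil (cs : List Char) : pvSplitDot cs ≠ [] := by
  induction cs with
  | nil => simp [pvSplitDot]
  | cons c r ih =>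
    simp only [pvSplitDot]
    split_ifs
    · simp
    · cases h : pvSplitDot r <;> simp

theorem pvSplitOn_go_eq (fuel : Nat) (cs cur : List Char) (acc : List (List Char))
    (hf : cs.length < fuel) :
    PySem.Chars.splitOn.go ['.'] fuel cs cur acc =
      acc.reverse ++ (match pvSplitDot cs with
        | [] => [cur.reverse]
        | h :: t => (cur.reverse ++ h) :: t) := by
  induction fuel generalizing cs cur acc with
  | zero => omega
  | succ fuel ih =>
    cases cs with
    | nil => simp [PySem.Chars.splitOn.go, pvSplitDot]
    | cons c r =>
      by_cases hc : c = '.'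
      · subst hc
        have h1 : PySem.Chars.splitOn.go ['.'] (fuel + 1) ('.' :: r) cur acc =
            PySem.Chars.splitOn.go ['.'] fuel r [] (cur.reverse :: acc) := by
          simp [PySem.Chars.splitOn.go, List.isPrefixOf]
        rw [h1, ih r [] (cur.reverse :: acc) (by simpa using hf)]
        rcases h : pvSplitDot r with _ | ⟨h₀, t⟩
        · exact absurd h (pvSplitDot_ne_nil r)
        · simp [pvSplitDot, h]
      · have h1 : PySem.Chars.splitOn.go ['.'] (fuel + 1) (c :: r) cur acc =
            PySem.Chars.splitOn.go ['.'] fuel r (c :: cur) acc := by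
          simp [PySem.Chars.splitOn.go, List.isPrefixOf, Ne.symm hc]
        rw [h1, ih r (c :: cur) acc (by simpa using hf)]
        rcases h : pvSplitDot r with _ | ⟨h₀, t⟩
        · exact absurd h (pvSplitDot_ne_nil r)
        · simp [pvSplitDot, hc, h]

theorem pvSplitOn_eq_splitDot (cs : List Char) :
    PySem.Chars.splitOn cs ['.'] = pvSplitDot cs := by
  have := pvSplitOn_go_eq (cs.length + 1) cs [] [] (by omega)
  rcases h : pvSplitDot cs with _ | ⟨h₀, t⟩
  · exact absurd h (pvSplitDot_ne_nil cs)
  · simpa [PySem.Chars.splitOn, h] using this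

theorem pvSplitDot_head_prefix (cs h : List Char) (t : List (List Char))
    (hP : pvSplitDot cs = h :: t) : h <+: cs := by
  induction cs generalizing h t with
  | nil =>
    simp only [pvSplitDot] at hP
    injection hP with h1 h2
    exact h1 ▸ List.nil_prefix
  | cons c r ih =>
    simp only [pvSplitDot] at hP
    split_ifs at hP with hc
    · injection hP with h1 h2
      exact h1 ▸ List.nil_prefix
    · rcases hr : pvSplitDot r with _ | ⟨h₀, t₀⟩
      · exact absurd hr (pvSplitDot_ne_nil r)
      · rw [hr] at hP
        injection hP with h1 h2
        exact h1 ▸ List.cons_prefix_cons.mpr ⟨rfl, ih h₀ t₀ hr⟩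

theorem pvSplitDot_no_dot (cs : List Char) (h : '.' ∉ cs) : pvSplitDot cs = [cs] := by
  induction cs with
  | nil => simp [pvSplitDot]
  | cons c r ih =>
    simp only [List.mem_cons, not_or] at h
    simp [pvSplitDot, Ne.symm h.1, ih h.2]

theorem pvSplitDot_append (xs ys : List Char) (h : '.' ∉ xs) :
    pvSplitDot (xs ++ '.' :: ys) = xs :: pvSplitDot ys := by
  induction xs with
  | nil => simp [pvSplitDot]
  | cons c r ih =>
    simp only [List.mem_cons, not_or] at h
    simp [pvSplitDot, Ne.symm h.1, ih h.2]

theorem pvJoin_splitDot (ys : List Char) :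
    PySem.Chars.join ['.'] (pvSplitDot ys) = ys := by
  induction ys with
  | nil => simp [pvSplitDot, PySem.Chars.join_singleton]
  | cons c r ih =>
    simp only [pvSplitDot]
    split_ifs with hc
    · subst hc
      rcases hr : pvSplitDot r with _ | ⟨h₀, t₀⟩
      · exact absurd hr (pvSplitDot_ne_nil r)
      · rw [hr] at ih
        rw [PySem.Chars.join_cons_cons, ih]
        rfl
    · rcases hr : pvSplitDot r with _ | ⟨h₀, t₀⟩
      · exact absurd hr (pvSplitDot_ne_nil r)
      · rw [hr] at ih
        cases t₀ with
        | nil =>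
          rw [PySem.Chars.join_singleton]
          rw [PySem.Chars.join_singleton] at ih
          simp [ih]
        | cons q t₁ =>
          rw [PySem.Chars.join_cons_cons]
          rw [PySem.Chars.join_cons_cons] at ih
          simp [← ih]

-- find s sub is THE first index at which sub is a prefix of the remainder.
theorem pvFind_eq_of (s sub : List Char) (j : Nat)
    (hj : sub <+: s.drop j) (hmin : ∀ i < j, ¬ sub <+: s.drop i) :
    PySem.Chars.find s sub = (j : Int) := by
  have hinf : sub <:+: s := hj.isInfix.trans (List.drop_suffix j s).isInfix
  have h0 : 0 ≤ PySem.Chars.find s sub := (PySem.Chars.find_nonneg_iff s sub).mpr hinf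
  obtain ⟨hpre, hm⟩ := PySem.Chars.find_spec (s := s) (sub := sub) h0
  rcases lt_trichotomy (PySem.Chars.find s sub).toNat j with h | h | h
  · exact absurd hpre (hmin _ h)
  · omega
  · exact absurd hj (hm j h)

theorem pvFind_nonneg_of_ne (s sub : List Char) (h : PySem.Chars.find s sub ≠ -1) :
    0 ≤ PySem.Chars.find s sub := by
  by_contra hneg
  exact h ((PySem.Chars.find_eq_neg_one_iff _ _).mpr
    (fun hin => hneg ((PySem.Chars.find_nonneg_iff _ _).mpr hin)))

theorem pvNoDot_take (cs : List Char) (k : Nat)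
    (hmin : ∀ i < k, ¬ ['.'] <+: cs.drop i) : '.' ∉ cs.take k := by
  intro hmem
  obtain ⟨i, hi, hget⟩ := List.getElem_of_mem hmem
  rw [List.length_take] at hi
  have hik : i < k := lt_of_lt_of_le hi (min_le_left _ _)
  have hil : i < cs.length := lt_of_lt_of_le hi (min_le_right _ _)
  apply hmin i hik
  rw [List.drop_eq_getElem_cons hil]
  have hget' : cs[i] = '.' := by simpa [List.getElem_take] using hget
  rw [hget']
  exact List.cons_prefix_cons.mpr ⟨rfl, List.nil_prefix⟩

-- Core equivalence: A's loop over the parts equals B's positional two-find computation.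
theorem pvMain (cs : List Char) (hinf : "perseus-".toList <:+: cs) :
    pvLoopA (pvSplitDot cs) =
      (if PySem.Chars.find (cs.drop (PySem.Chars.find cs "perseus-".toList).toNat) ['.'] = -1
       then none
       else some (cs.drop ((PySem.Chars.find cs "perseus-".toList).toNat +
          (PySem.Chars.find (cs.drop (PySem.Chars.find cs "perseus-".toList).toNat) ['.']).toNat + 1))) := by
  induction cs with
  | nil => exact absurd (List.infix_nil.mp hinf) (by decide)
  | cons c r ih =>
    by_cases hp : "perseus-".toList <+: (c :: r)
    · -- the first occurrence starts at index 0
      have hfind0 : PySem.Chars.find (c :: r) "perseus-".toList = (0 : Int) := by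
        exact_mod_cast pvFind_eq_of (c :: r) _ 0 (by simpa using hp) (by omega)
      rw [hfind0]
      simp only [Int.toNat_zero, List.drop_zero, Nat.zero_add]
      by_cases hdot : PySem.Chars.find (c :: r) ['.'] = -1
      · -- no dot anywhere: a single part, remaining is empty
        have hnd : '.' ∉ (c :: r) := by
          intro hmem
          exact (PySem.Chars.find_eq_neg_one_iff (c :: r) ['.']).mp hdot
            ((List.singleton_infix_iff '.' (c :: r)).mpr hmem)
        rw [pvSplitDot_no_dot _ hnd, if_pos hdot]
        simp [pvLoopA]
      · -- first dot at some index k ≥ |"perseus-"|: remaining = parts after the perseus part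
        have h0 : 0 ≤ PySem.Chars.find (c :: r) ['.'] := pvFind_nonneg_of_ne _ _ hdot
        obtain ⟨hpre, hm⟩ := PySem.Chars.find_spec (s := c :: r) (sub := ['.']) h0
        obtain ⟨u, hu⟩ := hpre
        set k := (PySem.Chars.find (c :: r) ['.']).toNat with hk
        have hdropk : (c :: r).drop k = '.' :: (c :: r).drop (k + 1) := by
          rw [← hu, ← List.tail_drop, ← hu]
          rfl
        have hcs : (c :: r) = (c :: r).take k ++ '.' :: (c :: r).drop (k + 1) := by
          conv_lhs => rw [← List.take_append_drop k (c :: r)]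
          rw [hdropk]
        have hndx : '.' ∉ (c :: r).take k := pvNoDot_take _ k hm
        have hsplit : pvSplitDot (c :: r) = (c :: r).take k :: pvSplitDot ((c :: r).drop (k + 1)) := by
          conv_lhs => rw [hcs]
          exact pvSplitDot_append _ _ hndx
        have hperx : "perseus-".toList <+: (c :: r).take k := by
          have hxp : ((c :: r).take k ++ ['.']) <+: (c :: r) := by
            conv_rhs => rw [hcs]
            simp
          by_cases hl : "perseus-".toList.length ≤ ((c :: r).take k).length
          · exact List.prefix_of_prefix_length_le hp (List.take_prefix k _) hl
          · exfalso
            have hle : ((c :: r).take k ++ ['.']).length ≤ "perseus-".toList.length := by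
              simp only [List.length_append, List.length_cons, List.length_nil]
              omega
            have hdotper : '.' ∈ "perseus-".toList :=
              (List.prefix_of_prefix_length_le hxp hp hle).subset (by simp)
            revert hdotper; decide
        rw [hsplit]
        simp only [pvLoopA]
        rw [if_pos ((PySem.Chars.isIn_iff_infix _ _).mpr hperx.isInfix)]
        rw [if_neg (pvSplitDot_ne_nil _), if_neg hdot, pvJoin_splitDot]
    · -- no occurrence at index 0: everything shifts by one position
      have hinfr : "perseus-".toList <:+: r := by
        rcases List.infix_cons_iff.mp hinf with h | h
        · exact absurd h hp
        · exact h
      have h0r : 0 ≤ PySem.Chars.find r "perseus-".toList :=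
        (PySem.Chars.find_nonneg_iff _ _).mpr hinfr
      obtain ⟨hpre, hm⟩ := PySem.Chars.find_spec (s := r) (sub := "perseus-".toList) h0r
      set jr := (PySem.Chars.find r "perseus-".toList).toNat with hjr
      have hshift : PySem.Chars.find (c :: r) "perseus-".toList = ((jr + 1 : Nat) : Int) := by
        apply pvFind_eq_of
        · simpa using hpre
        · intro i hi
          cases i with
          | zero => simpa using hp
          | succ i => exact fun hpp => hm i (by omega) (by simpa using hpp)
      rw [hshift]
      simp only [Int.toNat_natCast, List.drop_succ_cons]
      -- the loop gives the same answer on cs's parts as on r's parts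
      have hLHS : pvLoopA (pvSplitDot (c :: r)) = pvLoopA (pvSplitDot r) := by
        by_cases hc : c = '.'
        · subst hc
          have hP : pvSplitDot ('.' :: r) = [] :: pvSplitDot r := by simp [pvSplitDot]
          rw [hP]
          simp only [pvLoopA]
          rw [if_neg (by
            simp only [PySem.Chars.isIn_iff_infix]
            intro h
            have hnil := List.infix_nil.mp h
            revert hnil; decide)]
        · rcases hr : pvSplitDot r with _ | ⟨h₀, t₀⟩
          · exact absurd hr (pvSplitDot_ne_nil r)
          · have hsplit : pvSplitDot (c :: r) = (c :: h₀) :: t₀ := by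
              simp [pvSplitDot, hc, hr]
            have hhp : (c :: h₀) <+: (c :: r) := pvSplitDot_head_prefix _ _ _ hsplit
            have hiff : PySem.Chars.isIn "perseus-".toList (c :: h₀) =
                PySem.Chars.isIn "perseus-".toList h₀ := by
              apply Bool.eq_iff_iff.mpr
              rw [PySem.Chars.isIn_iff_infix, PySem.Chars.isIn_iff_infix]
              constructor
              · intro h
                rcases List.infix_cons_iff.mp h with h | h
                · exact absurd (h.trans hhp) hp
                · exact h
              · intro h
                exact List.infix_cons_iff.mpr (Or.inr h)
            rw [hsplit]
            simp only [pvLoopA, hiff]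
      rw [hLHS, ih hinfr]
      split_ifs with hdd
      · rfl
      · have harith : jr + (PySem.Chars.find (List.drop jr r) ['.']).toNat + 1 =
            jr + 1 + (PySem.Chars.find (List.drop jr r) ['.']).toNat := by omega
        rw [harith]

-- ===== VERDICT (by name: the statement is the Claim_ definition above) =====
theorem extract_ref_section_spec : Claim_equal_extract_ref_section := by
  intro ref _
  unfold Spec_extract_ref_section extract_ref_section extract_ref_section_alt
  by_cases hg : (PySem.Str.isIn "perseus-grc" ref || PySem.Str.isIn "perseus-eng" ref) = true
  · rw [if_pos hg, if_pos hg]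
    have hinf : "perseus-".toList <:+: ref.toList := by
      rcases (by simpa using hg :
          PySem.Str.isIn "perseus-grc" ref = true ∨ PySem.Str.isIn "perseus-eng" ref = true) with h | h
      · have h1 : "perseus-grc".toList <:+: ref.toList :=
          (PySem.Chars.isIn_iff_infix _ _).mp (by simpa using h)
        exact (show ("perseus-".toList : List Char) <+: "perseus-grc".toList by decide).isInfix.trans h1
      · have h1 : "perseus-eng".toList <:+: ref.toList :=
          (PySem.Chars.isIn_iff_infix _ _).mp (by simpa using h)
        exact (show ("perseus-".toList : List Char) <+: "perseus-eng".toList by decide).isInfix.trans h1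
    have h0 : 0 ≤ PySem.Chars.find ref.toList "perseus-".toList :=
      (PySem.Chars.find_nonneg_iff _ _).mpr hinf
    set jn := (PySem.Chars.find ref.toList "perseus-".toList).toNat with hjn
    have hjlen : jn ≤ ref.toList.length := by
      have := PySem.Chars.find_le_length ref.toList "perseus-".toList
      omega
    have hFF : PySem.Str.findFrom ref "." (PySem.Str.find ref "perseus-") =
        (if PySem.Chars.find (ref.toList.drop jn) ['.'] = -1 then -1
         else (jn : Int) + PySem.Chars.find (ref.toList.drop jn) ['.']) := by
      rw [PySem.Str.findFrom_eq, PySem.Str.find_eq]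
      have hcast : PySem.Chars.find ref.toList "perseus-".toList = ((jn : Nat) : Int) := by omega
      rw [hcast]
      have := PySem.Chars.findFrom_natCast ref.toList ".".toList jn hjlen
      simpa using this
    rw [pvSplitOn_eq_splitDot, pvMain ref.toList hinf]
    simp only [hFF]
    by_cases hdd : PySem.Chars.find (ref.toList.drop jn) ['.'] = -1
    · rw [if_pos hdd, if_pos hdd]
      simp
    · rw [if_neg hdd, if_neg hdd]
      have hd0 : 0 ≤ PySem.Chars.find (ref.toList.drop jn) ['.'] :=
        pvFind_nonneg_of_ne _ _ hdd
      rw [if_pos (show ((jn : Int) + PySem.Chars.find (ref.toList.drop jn) ['.']) ≠ -1 by omega)]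
      have harg : ((jn : Int) + PySem.Chars.find (ref.toList.drop jn) ['.'] + 1) =
          (((jn + (PySem.Chars.find (ref.toList.drop jn) ['.']).toNat + 1 : Nat) : Int)) := by omega
      rw [harg]
      show some (String.ofList _) = some (String.ofList (PySem.Chars.slice _ _ _))
      rw [PySem.Chars.slice_eq_listSlice, PySem.List.slice_from_natCast]
  · rw [if_neg hg, if_neg hg]
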